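-- pv_equiv track=rewrite | github.com/Hanscal/DCKS | src/utils/metrics.py | _calc_cover
-- ===== SOURCE A (Python) =====
-- from typing import List
-- from collections import defaultdict, Counter, namedtuple
--
-- def _calc_ngram_dict(tokens:List[str], ngram:int, dict_ref=None):
--     ngram_dict = defaultdict(int) if dict_ref is None else dict_ref
--     total = len(tokens)
--     for i in range(0, total - ngram + 1):
--         item = tuple(tokens[i:i + ngram])
--         ngram_dict[item] += 1
--     return ngram_dict
--
-- def _calc_cover(cand, gold, ngram):
--     cand_dict = _calc_ngram_dict(cand, ngram)
--     gold_dict = _calc_ngram_dict(gold, ngram)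
--     cover = 0
--     total = 0
--     for token, freq in cand_dict.items():
--         if token in gold_dict:
--             cover += min(freq, gold_dict[token])
--         total += freq
--     return cover, total
-- ===== SOURCE B (Python) =====
-- from collections import Counter
--
-- def _calc_cover(cand, gold, ngram):
--     remaining = Counter(tuple(gold[i:i + ngram]) for i in range(len(gold) - ngram + 1))
--     cover = 0
--     total = 0
--     for i in range(len(cand) - ngram + 1):
--         g = tuple(cand[i:i + ngram])
--         total += 1
--         if remaining[g] > 0:
--             remaining[g] -= 1
--             cover += 1
--     return cover, total
-- ===== Notes on version B (the rewrite author's own statement) =====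
-- stated objective: alternative
-- what changed: B builds no candidate-side frequency dict at all: it streams once over the candidate n-gram positions and greedily consumes a mutable gold-count multiset (cover += 1 and remaining[g] -= 1 whenever a copy of the n-gram is still available), counting total in the same pass, instead of A's two-dict build followed by a min-over-keys loop.
import Mathlib
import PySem

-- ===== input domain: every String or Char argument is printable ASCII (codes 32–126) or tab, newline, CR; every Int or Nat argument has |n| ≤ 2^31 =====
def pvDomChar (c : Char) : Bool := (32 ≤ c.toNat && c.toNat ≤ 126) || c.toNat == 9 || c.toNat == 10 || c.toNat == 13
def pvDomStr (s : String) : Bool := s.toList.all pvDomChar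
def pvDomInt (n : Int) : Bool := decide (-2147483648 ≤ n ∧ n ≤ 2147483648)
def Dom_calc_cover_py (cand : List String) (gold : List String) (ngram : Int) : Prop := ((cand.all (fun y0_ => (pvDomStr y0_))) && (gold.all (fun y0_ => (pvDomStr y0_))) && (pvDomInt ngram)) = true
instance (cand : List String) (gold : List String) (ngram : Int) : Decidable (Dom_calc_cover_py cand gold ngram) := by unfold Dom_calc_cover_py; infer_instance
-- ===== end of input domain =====

-- B streams once over the candidate n-gram positions, greedily consuming a mutable
-- gold-count multiset (no candidate-side dict is built); same return value as A
-- (alternative algorithm, no speed claim).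

-- ===== PORT A =====
-- _calc_ngram_dict: defaultdict(int) loop 'ngram_dict[item] += 1' over range(0, total - ngram + 1)
def pvCalcNgramDict (tokens : List String) (ngram : Int) : PySem.Dict (List String) Int :=
  (PySem.List.pyRange 0 ((tokens.length : Int) - ngram + 1) 1).foldl
    (fun d i =>
      d.insert (PySem.List.slice tokens (some i) (some (i + ngram)))
        (d.getD (PySem.List.slice tokens (some i) (some (i + ngram))) 0 + 1))
    PySem.Dict.empty

def calc_cover_py (cand : List String) (gold : List String) (ngram : Int) : Int × Int :=
  let cand_dict := pvCalcNgramDict cand ngram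
  let gold_dict := pvCalcNgramDict gold ngram
  -- for token, freq in cand_dict.items(): if token in gold_dict: cover += min(freq, gold_dict[token]); total += freq
  cand_dict.items.foldl
    (fun ct kv =>
      (if gold_dict.contains kv.1 then ct.1 + min kv.2 (gold_dict.getD kv.1 0) else ct.1,
       ct.2 + kv.2))
    (0, 0)

-- ===== PORT B =====
-- remaining = Counter(tuple(gold[i:i+ngram]) for i in range(len(gold)-ngram+1))
def pvRemaining0 (gold : List String) (ngram : Int) : PySem.Dict (List String) Int :=
  PySem.Dict.counter
    ((PySem.List.pyRange 0 ((gold.length : Int) - ngram + 1) 1).map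
      (fun i => PySem.List.slice gold (some i) (some (i + ngram))))

-- the loop body: g = tuple(cand[i:i+ngram]); total += 1; if remaining[g] > 0: consume
def pvGreedyStep (cand : List String) (ngram : Int)
    (st : PySem.Dict (List String) Int × Int × Int) (i : Int) :
    PySem.Dict (List String) Int × Int × Int :=
  let g := PySem.List.slice cand (some i) (some (i + ngram))
  if 0 < st.1.getD g 0 then
    (st.1.insert g (st.1.getD g 0 - 1), st.2.1 + 1, st.2.2 + 1)
  else
    (st.1, st.2.1, st.2.2 + 1)

def calc_cover_py_alt (cand : List String) (gold : List String) (ngram : Int) : Int × Int :=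
  let st := (PySem.List.pyRange 0 ((cand.length : Int) - ngram + 1) 1).foldl
    (pvGreedyStep cand ngram) (pvRemaining0 gold ngram, 0, 0)
  (st.2.1, st.2.2)

-- ===== PRECONDITION & SPEC =====
def Spec_calc_cover_py (cand : List String) (gold : List String) (ngram : Int) (out : Int × Int) : Prop := out = calc_cover_py_alt cand gold ngram
instance (cand : List String) (gold : List String) (ngram : Int) (out : Int × Int) : Decidable (Spec_calc_cover_py cand gold ngram out) := by unfold Spec_calc_cover_py; infer_instance

-- ===== CLAIM (what is proved, stated in full; the proofs are below) =====
def Claim_equal_calc_cover_py : Prop := ∀ (cand : List String) (gold : List String) (ngram : Int), Dom_calc_cover_py cand gold ngram → Spec_calc_cover_py cand gold ngram (calc_cover_py cand gold ngram)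

-- ===== LEMMAS AND PROOFS =====

-- the candidate/gold n-gram list both ports slice out
def pvNgrams (tokens : List String) (ngram : Int) : List (List String) :=
  (PySem.List.pyRange 0 ((tokens.length : Int) - ngram + 1) 1).map
    (fun i => PySem.List.slice tokens (some i) (some (i + ngram)))

-- A's defaultdict loop builds Counter(ngrams)
theorem pvCalcNgramDict_eq (tokens : List String) (ngram : Int) :
    pvCalcNgramDict tokens ngram = PySem.Dict.counter (pvNgrams tokens ngram) := by
  unfold pvCalcNgramDict pvNgrams
  rw [← PySem.Dict.foldl_insert_getD_add_one_eq_counter, List.foldl_map]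

-- A's item loop as a pair of sums
theorem pvFoldA (gd : PySem.Dict (List String) Int) (l : List (List String × Int)) (c0 t0 : Int) :
    l.foldl (fun ct kv =>
        (if gd.contains kv.1 then ct.1 + min kv.2 (gd.getD kv.1 0) else ct.1, ct.2 + kv.2))
      (c0, t0)
    = (c0 + (l.map (fun kv => if gd.contains kv.1 then min kv.2 (gd.getD kv.1 0) else 0)).sum,
       t0 + (l.map (·.2)).sum) := by
  induction l generalizing c0 t0 with
  | nil => simp
  | cons kv l ih =>
    simp only [List.foldl_cons, List.map_cons, List.sum_cons, ih]
    by_cases h : gd.contains kv.1 <;> simp [h, Prod.ext_iff] <;> omega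

-- two maps over a nodup list differing only at one member differ by that one term
theorem pvSumUpdate (L : List (List String)) (hnd : L.Nodup) (k : List String) (hk : k ∈ L)
    (f g : List String → Int) (hoff : ∀ j ∈ L, j ≠ k → f j = g j) :
    (L.map f).sum = (L.map g).sum + (f k - g k) := by
  induction L with
  | nil => cases hk
  | cons a L ih =>
    simp only [List.nodup_cons] at hnd
    rcases List.mem_cons.mp hk with rfl | hkL
    · have : L.map f = L.map g := List.map_congr_left fun j hj =>
        hoff j (List.mem_cons_of_mem _ hj) (fun he => hnd.1 (he ▸ hj))
      simp [this]; ring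
    · have ha : f a = g a := hoff a (List.mem_cons_self ..) (fun he => hnd.1 (he ▸ hkL))
      have := ih hnd.2 hkL (fun j hj hne => hoff j (List.mem_cons_of_mem _ hj) hne)
      simp only [List.map_cons, List.sum_cons, this, ha]; ring

-- the greedy consumption loop computes Σ min(count, available) and the length
theorem pvGreedy (xs : List (List String)) (L : List (List String)) (hnd : L.Nodup)
    (hmem : ∀ x ∈ xs, x ∈ L) :
    ∀ (d : PySem.Dict (List String) Int) (c t : Int),
    (xs.foldl (fun st g =>
        if 0 < st.1.getD g 0 then
          (st.1.insert g (st.1.getD g 0 - 1), st.2.1 + 1, st.2.2 + 1)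
        else
          (st.1, st.2.1, st.2.2 + 1)) (d, c, t)).2
    = (c + (L.map (fun k => min ((xs.count k : Int)) (max (d.getD k 0) 0))).sum,
       t + (xs.length : Int)) := by
  induction xs with
  | nil =>
    intro d c t
    have h0 : ∀ x ∈ L.map (fun k => min (((List.nil (α := List String)).count k : Int)) (max (d.getD k 0) 0)), x = 0 := by
      intro x hx
      simp only [List.mem_map] at hx
      obtain ⟨k, _, rfl⟩ := hx
      simp only [List.count_nil, Nat.cast_zero]
      exact min_eq_left (le_max_right _ _)
    rw [List.foldl_nil, List.sum_eq_zero h0]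
    simp
  | cons k xs ih =>
    intro d c t
    have hkL : k ∈ L := hmem k (List.mem_cons_self ..)
    have hmem' : ∀ x ∈ xs, x ∈ L := fun x hx => hmem x (List.mem_cons_of_mem _ hx)
    simp only [List.foldl_cons]
    by_cases h : 0 < d.getD k 0
    · rw [if_pos h, ih hmem' _ (c + 1) (t + 1)]
      have hoff : ∀ j ∈ L, j ≠ k →
          min (((k :: xs).count j : Int)) (max (d.getD j 0) 0)
          = min ((xs.count j : Int)) (max ((d.insert k (d.getD k 0 - 1)).getD j 0) 0) := by
        intro j hj hne
        simp [PySem.Dict.getD_insert, hne, Ne.symm hne]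
      have hsum := pvSumUpdate L hnd k hkL
        (fun k' => min (((k :: xs).count k' : Int)) (max (d.getD k' 0) 0))
        (fun k' => min ((xs.count k' : Int)) (max ((d.insert k (d.getD k 0 - 1)).getD k' 0) 0)) hoff
      have hdelta :
          min (((k :: xs).count k : Int)) (max (d.getD k 0) 0)
          - min ((xs.count k : Int)) (max ((d.insert k (d.getD k 0 - 1)).getD k 0) 0) = 1 := by
        have hcnt : ((k :: xs).count k : Int) = (xs.count k : Int) + 1 := by
          rw [List.count_cons_self]; push_cast; ring
        rw [hcnt, PySem.Dict.getD_insert]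
        simp only [if_true]
        have h1 : max (d.getD k 0) 0 = d.getD k 0 := max_eq_left (le_of_lt h)
        have h2 : max (d.getD k 0 - 1) 0 = d.getD k 0 - 1 := max_eq_left (by omega)
        rw [h1, h2]
        have hc0 : (0:Int) ≤ (xs.count k : Int) := Int.natCast_nonneg _
        omega
      rw [Prod.ext_iff]
      constructor
      · simp only [hsum]; omega
      · simp only [List.length_cons]; push_cast; ring
    · rw [if_neg h, ih hmem' d c (t + 1)]
      have hoff : ∀ j ∈ L, j ≠ k →
          min (((k :: xs).count j : Int)) (max (d.getD j 0) 0)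
          = min ((xs.count j : Int)) (max (d.getD j 0) 0) := by
        intro j hj hne
        simp [Ne.symm hne]
      have hsum := pvSumUpdate L hnd k hkL
        (fun k' => min (((k :: xs).count k' : Int)) (max (d.getD k' 0) 0))
        (fun k' => min ((xs.count k' : Int)) (max (d.getD k' 0) 0)) hoff
      have hdelta :
          min (((k :: xs).count k : Int)) (max (d.getD k 0) 0)
          - min ((xs.count k : Int)) (max (d.getD k 0) 0) = 0 := by
        have hm : max (d.getD k 0) 0 = 0 := max_eq_right (by omega)
        rw [List.count_cons_self, hm]
        have hc0 : (0:Int) ≤ (xs.count k : Int) := Int.natCast_nonneg _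
        push_cast
        omega
      rw [Prod.ext_iff]
      constructor
      · simp only [hsum]; omega
      · simp only [List.length_cons]; push_cast; ring

-- a nodup list covering xs sums the counts of xs to its length
theorem pvSumCount (xs : List (List String)) (L : List (List String)) (hnd : L.Nodup)
    (hmem : ∀ x ∈ xs, x ∈ L) :
    (L.map (fun k => (xs.count k : Int))).sum = (xs.length : Int) := by
  induction xs with
  | nil => simp
  | cons x xs ih =>
    have hx : x ∈ L := hmem x (List.mem_cons_self ..)
    have hoff : ∀ j ∈ L, j ≠ x → (((x :: xs).count j : Int)) = ((xs.count j : Int)) := by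
      intro j hj hne; simp [Ne.symm hne]
    have hsum := pvSumUpdate L hnd x hx
      (fun k => ((x :: xs).count k : Int)) (fun k => (xs.count k : Int)) hoff
    have hdelta : (((x :: xs).count x : Int)) - ((xs.count x : Int)) = 1 := by
      rw [List.count_cons_self]; push_cast; omega
    have hrec := ih (fun y hy => hmem y (List.mem_cons_of_mem _ hy))
    simp only [hsum, hrec, List.length_cons]
    push_cast
    omega

-- ===== VERDICT (by name: the statement is the Claim_ definition above) =====
theorem calc_cover_py_spec : Claim_equal_calc_cover_py := by
  intro cand gold ngram _
  unfold Spec_calc_cover_py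
  have hB : calc_cover_py_alt cand gold ngram
      = ((pvNgrams cand ngram).foldl (fun st g =>
          if 0 < st.1.getD g 0 then
            (st.1.insert g (st.1.getD g 0 - 1), st.2.1 + 1, st.2.2 + 1)
          else
            (st.1, st.2.1, st.2.2 + 1)) (pvRemaining0 gold ngram, 0, 0)).2 := by
    unfold calc_cover_py_alt pvNgrams pvGreedyStep
    rw [List.foldl_map]
  set xs := pvNgrams cand ngram with hxs
  set ys := pvNgrams gold ngram with hys
  have hL : ∀ x ∈ xs, x ∈ PySem.Set.ofList xs := fun x hx => (PySem.Set.mem_ofList xs x).mpr hx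
  rw [hB, pvGreedy xs (PySem.Set.ofList xs) (PySem.Set.nodup_ofList xs) hL (pvRemaining0 gold ngram) 0 0]
  unfold calc_cover_py
  rw [pvCalcNgramDict_eq, pvCalcNgramDict_eq, ← hxs, ← hys, pvFoldA, PySem.Dict.items_counter]
  simp only [List.map_map]
  have hrem : pvRemaining0 gold ngram = PySem.Dict.counter ys := rfl
  refine Prod.ext ?_ ?_
  · simp only [zero_add]
    refine congrArg List.sum (List.map_congr_left fun k hk => ?_)
    have hkx : k ∈ xs := (PySem.Set.mem_ofList xs k).mp hk
    simp only [Function.comp, PySem.Dict.contains_counter, PySem.Dict.getD_counter, hrem]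
    by_cases hky : k ∈ ys
    · have h1 : (0:Int) ≤ (ys.count k : Int) := Int.natCast_nonneg _
      rw [if_pos (by simpa using hky), max_eq_left h1]
    · have hcy : ys.count k = 0 := List.count_eq_zero.mpr hky
      have hcx : (0:Int) ≤ (xs.count k : Int) := Int.natCast_nonneg _
      rw [if_neg (by simpa using hky), hcy]
      push_cast
      omega
  · simp only [zero_add]
    exact pvSumCount xs _ (PySem.Set.nodup_ofList xs) hL
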